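-- pv_equiv track=rewrite | github.com/dosilt/Programmers-Python-dosilt | level2/타겟 넘버.py | dfs
-- ===== SOURCE A (Python) =====
-- def dfs(numbers):
--     cur_point = [numbers[0], -numbers[0]]
--
--     for i in numbers[1:]:
--         temp = []
--         for c in cur_point:
--             temp.append(c + i)
--             temp.append(c - i)
--
--         cur_point = temp
--     return cur_point
-- ===== SOURCE B (Python) =====
-- def dfs(numbers):
--     def rec(i, total):
--         if i == len(numbers):
--             return [total]
--         return rec(i + 1, total + numbers[i]) + rec(i + 1, total - numbers[i])
--     return rec(0, 0)
-- ===== Notes on version B (the rewrite author's own statement) =====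
-- stated objective: alternative
-- what changed: Replaces A's iterative level-by-level list rebuilding (an explicit frontier list rebuilt per element) with a recursive DFS rec(i, total) that concatenates the + branch before the - branch.
-- outside the precondition, e.g. on dfs([]): A raises IndexError, B returns [0]
import Mathlib
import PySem

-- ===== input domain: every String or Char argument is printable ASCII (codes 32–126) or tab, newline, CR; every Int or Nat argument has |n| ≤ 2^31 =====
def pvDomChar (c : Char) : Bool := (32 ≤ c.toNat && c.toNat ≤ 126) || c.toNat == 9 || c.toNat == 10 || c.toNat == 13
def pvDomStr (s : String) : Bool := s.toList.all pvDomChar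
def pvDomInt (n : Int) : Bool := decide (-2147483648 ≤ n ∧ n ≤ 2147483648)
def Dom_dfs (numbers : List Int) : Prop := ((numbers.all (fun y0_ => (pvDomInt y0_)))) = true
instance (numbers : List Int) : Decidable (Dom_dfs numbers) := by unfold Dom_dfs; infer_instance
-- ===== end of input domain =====

-- B computes the same list of signed sums by recursive DFS instead of A's iterative frontier rebuilding; same cost.

-- ===== PORT A =====
-- the outer 'for i in numbers[1:]' loop; the inner 'for c in cur_point' loop is the foldl
def dfsLoop (cur : List Int) (rest : List Int) : List Int :=
  match rest with
  | [] => cur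
  | i :: t => dfsLoop (cur.foldl (fun temp c => temp ++ [c + i, c - i]) []) t

def dfs (numbers : List Int) : List Int :=
  match numbers with
  | [] => []                      -- numbers[0] raises IndexError in Python; [] excluded by Pre_dfs
  | n :: t => dfsLoop [n, -n] t

-- ===== PORT B =====
-- rec(i, total): recursion over the remaining suffix of numbers
def dfsRec (rest : List Int) (total : Int) : List Int :=
  match rest with
  | [] => [total]
  | n :: t => dfsRec t (total + n) ++ dfsRec t (total - n)

def dfs_alt (numbers : List Int) : List Int := dfsRec numbers 0

-- ===== PRECONDITION & SPEC =====
-- Pre_ excludes only the empty list, on which A raises IndexError (numbers[0]); B naturally returns the singleton zero-sum there (cited in claim.json).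
def Pre_dfs (numbers : List Int) : Prop := numbers ≠ []
instance (numbers : List Int) : Decidable (Pre_dfs numbers) := by unfold Pre_dfs; infer_instance

def pvWitness_dfs : List Int := ([1, 2, 3])

def Spec_dfs (numbers : List Int) (out : List Int) : Prop := out = dfs_alt numbers
instance (numbers : List Int) (out : List Int) : Decidable (Spec_dfs numbers out) := by unfold Spec_dfs; infer_instance

-- ===== CLAIM (what is proved, stated in full; the proofs are below) =====
def Claim_equal_dfs : Prop := ∀ (numbers : List Int), Dom_dfs numbers → Pre_dfs numbers → Spec_dfs numbers (dfs numbers)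

-- ===== LEMMAS AND PROOFS =====
theorem foldl_pairs (cur : List Int) (i : Int) (acc : List Int) :
    cur.foldl (fun temp c => temp ++ [c + i, c - i]) acc
      = acc ++ cur.flatMap (fun c => [c + i, c - i]) := by
  induction cur generalizing acc with
  | nil => simp [List.foldl]
  | cons c t ih => simp [List.foldl, ih, List.flatMap_cons]

theorem dfsLoop_flatMap (rest cur : List Int) :
    dfsLoop cur rest = cur.flatMap (fun c => dfsRec rest c) := by
  induction rest generalizing cur with
  | nil => simp [dfsLoop, dfsRec]
  | cons i t ih =>
      simp only [dfsLoop, foldl_pairs, List.nil_append, ih, List.flatMap_assoc]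
      congr 1
      funext c
      simp [dfsRec, List.flatMap_cons]

-- ===== VERDICT (by name: the statement is the Claim_ definition above) =====
theorem dfs_spec : Claim_equal_dfs := by
  intro numbers _ hpre
  unfold Spec_dfs dfs_alt
  match numbers with
  | [] => exact absurd rfl hpre
  | n :: t =>
      simp [dfs, dfsLoop_flatMap, dfsRec, List.flatMap_cons]
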